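-- pv_equiv track=rewrite | github.com/Arsen1302/Code-copy-detector | TestData/solutions/problem_309_1_1.py | solution_309_1_1
-- ===== SOURCE A (Python) =====
-- from typing import List
--
-- def solution_309_1_1(s: str, d: List[str]) -> str:
--     def solution_309_1_2(main: str, sub: str) -> bool:
--         i, j, m, n = 0, 0, len(main), len(sub)
--         while i < m and j < n and n - j >= m - i:
--             if main[i] == sub[j]:
--                 i += 1
--             j += 1
--         return i == m
--
--     res = ''
--     helper = sorted(d, key = lambda x: len(x), reverse = True)
--     for word in helper:
--         if len(word) < len(res): return res
--         if ( not res or word < res )  and solution_309_1_2(word, s):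
--             res = word
--     return res
-- ===== SOURCE B (Python) =====
-- def solution_309_1_1(s, d):
--     def is_sub(word):
--         i, j = 0, 0
--         while i < len(word) and j < len(s):
--             if word[i] == s[j]:
--                 i += 1
--             j += 1
--         return i == len(word)
--
--     best = ''
--     for word in d:
--         if is_sub(word) and (len(word) > len(best) or (len(word) == len(best) and word < best)):
--             best = word
--     return best
-- ===== Notes on version B (the rewrite author's own statement) =====
-- stated objective: simpler
-- what changed: Replaced A's sort-by-length-descending with early-exit scan by a single pass over d in original order keeping a running best (longer wins, equal length breaks ties by smaller lexicographic word), with a plain two-pointer subsequence check without A's remaining-length early-exit.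
import Mathlib
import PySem

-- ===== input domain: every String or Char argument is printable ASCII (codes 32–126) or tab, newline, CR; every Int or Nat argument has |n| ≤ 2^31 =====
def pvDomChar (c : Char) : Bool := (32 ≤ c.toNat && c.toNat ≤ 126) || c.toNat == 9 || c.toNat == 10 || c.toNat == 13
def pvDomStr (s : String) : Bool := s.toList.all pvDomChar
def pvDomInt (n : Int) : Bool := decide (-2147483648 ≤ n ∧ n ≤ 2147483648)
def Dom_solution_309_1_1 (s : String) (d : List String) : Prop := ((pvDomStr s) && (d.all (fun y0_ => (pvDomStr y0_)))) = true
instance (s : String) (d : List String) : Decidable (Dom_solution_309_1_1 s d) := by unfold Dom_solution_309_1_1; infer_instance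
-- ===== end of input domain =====

-- B replaces A's sort-descending-with-early-exit by a single running-maximum pass over d; same result, no sort.

-- ===== PORT A =====
-- A's inner while loop over (i, j): the state (i, j) is represented by the remaining
-- suffixes main[i:], sub[j:]; the guard `n - j >= m - i` is `¬ (st.length < mt.length)`
-- (both sides of Python's comparison carry the same +1 for the current heads).
def pvSubA : List Char → List Char → Bool
  | [], _ => true
  | _ :: _, [] => false
  | a :: mt, b :: st =>
    if st.length < mt.length then false
    else if a == b then pvSubA mt st else pvSubA (a :: mt) st

-- A's for-loop with its early `return res`.
def pvLoopA (s : String) (res : String) : List String → String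
  | [] => res
  | w :: ws =>
    if w.toList.length < res.toList.length then res
    else if (res.toList.isEmpty || decide (w < res)) && pvSubA w.toList s.toList then
      pvLoopA s w ws
    else
      pvLoopA s res ws

def solution_309_1_1 (s : String) (d : List String) : String :=
  pvLoopA s "" (PySem.List.sorted d (fun x => x.toList.length) true)

-- ===== PORT B =====
-- B's two-pointer check: state (i, j) as the remaining suffixes of word and s.
def pvSubB : List Char → List Char → Bool
  | [], _ => true
  | _ :: _, [] => false
  | a :: wt, c :: st => if a == c then pvSubB wt st else pvSubB (a :: wt) st

def pvStepB (s : String) (best w : String) : String :=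
  if pvSubB w.toList s.toList &&
      (decide (best.toList.length < w.toList.length) ||
        (w.toList.length == best.toList.length && decide (w < best))) then w
  else best

def solution_309_1_1_alt (s : String) (d : List String) : String :=
  d.foldl (pvStepB s) ""

-- ===== PRECONDITION & SPEC =====
def Spec_solution_309_1_1 (s : String) (d : List String) (out : String) : Prop := out = solution_309_1_1_alt s d
instance (s : String) (d : List String) (out : String) : Decidable (Spec_solution_309_1_1 s d out) := by unfold Spec_solution_309_1_1; infer_instance

-- ===== CLAIM (what is proved, stated in full; the proofs are below) =====
def Claim_equal_solution_309_1_1 : Prop := ∀ (s : String) (d : List String), Dom_solution_309_1_1 s d → Spec_solution_309_1_1 s d (solution_309_1_1 s d)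

-- ===== LEMMAS AND PROOFS =====

-- "w beats best": strictly better under (length, then smaller lexicographic).
abbrev pvBeats (w best : String) : Prop :=
  best.toList.length < w.toList.length ∨
    (w.toList.length = best.toList.length ∧ w < best)

-- B's check succeeds only if the word is no longer than s.
theorem pvSubB_length {m s : List Char} (h : pvSubB m s = true) : m.length ≤ s.length := by
  induction s generalizing m with
  | nil =>
    cases m with
    | nil => simp
    | cons a mt => simp [pvSubB] at h
  | cons c st ih =>
    cases m with
    | nil => simp
    | cons a mt =>
      simp only [pvSubB] at h
      simp only [List.length_cons]
      by_cases hac : (a == c) = true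
      · rw [if_pos hac] at h
        have := ih h
        omega
      · rw [if_neg hac] at h
        have := ih h
        simp only [List.length_cons] at this
        omega

-- The two subsequence checkers agree.
theorem pvSub_eq (m s : List Char) : pvSubA m s = pvSubB m s := by
  induction s generalizing m with
  | nil => cases m <;> rfl
  | cons c st ih =>
    cases m with
    | nil => rfl
    | cons a mt =>
      simp only [pvSubA, pvSubB]
      by_cases hlt : st.length < mt.length
      · rw [if_pos hlt]
        by_cases hb : pvSubB (a :: mt) (c :: st) = true
        · have := pvSubB_length hb
          simp only [List.length_cons] at this
          omega
        · exact ((Bool.not_eq_true _).mp hb).symm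
      · rw [if_neg hlt]
        by_cases hac : (a == c) = true <;> simp [hac, ih]

theorem pvStepB_pos (s best w : String) (h1 : pvSubB w.toList s.toList = true)
    (h2 : pvBeats w best) : pvStepB s best w = w := by
  unfold pvStepB
  rcases h2 with h2 | ⟨h2, h2'⟩
  · have hb : decide (best.toList.length < w.toList.length) = true := decide_eq_true h2
    simp only [h1, hb, Bool.true_and, Bool.true_or, if_true]
  · have hb : (w.toList.length == best.toList.length) = true := by simpa using h2
    have hc : decide (w < best) = true := decide_eq_true h2'
    simp only [h1, hb, hc, Bool.and_self, Bool.or_true, if_true]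

theorem pvStepB_neg (s best w : String)
    (h : ¬ (pvSubB w.toList s.toList = true ∧ pvBeats w best)) : pvStepB s best w = best := by
  unfold pvStepB
  by_cases h1 : pvSubB w.toList s.toList = true
  · rw [if_neg]
    intro hc
    apply h
    refine ⟨h1, ?_⟩
    rw [h1, Bool.true_and] at hc
    rcases (Bool.or_eq_true _ _).mp hc with hc | hc
    · exact Or.inl (of_decide_eq_true hc)
    · rcases (Bool.and_eq_true _ _).mp hc with ⟨hl, hlt⟩
      exact Or.inr ⟨by simpa using hl, of_decide_eq_true hlt⟩
  · simp [h1]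

-- When the word passes the subsequence test, B's step is the maximum under pvBeats.
theorem pvStepB_true (s z x : String) (px : pvSubB x.toList s.toList = true) :
    pvStepB s z x = if pvBeats x z then x else z := by
  by_cases h : pvBeats x z
  · rw [if_pos h, pvStepB_pos s z x px h]
  · rw [if_neg h, pvStepB_neg s z x (fun hc => h hc.2)]

theorem pvBeats_trans {x y z : String} (h1 : pvBeats x y) (h2 : pvBeats y z) : pvBeats x z := by
  rcases h1 with h1 | ⟨h1, h1'⟩ <;> rcases h2 with h2 | ⟨h2, h2'⟩
  · exact Or.inl (lt_trans h2 h1)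
  · exact Or.inl (h2 ▸ h1)
  · exact Or.inl (h1 ▸ h2)
  · exact Or.inr ⟨h1.trans h2, lt_trans h1' h2'⟩

theorem pvBeats_asymm {x y : String} (h1 : pvBeats x y) (h2 : pvBeats y x) : False := by
  rcases h1 with h1 | ⟨h1, h1'⟩ <;> rcases h2 with h2 | ⟨h2, h2'⟩
  · omega
  · omega
  · omega
  · exact absurd h2' (not_lt_of_gt h1')

theorem pvBeats_total_eq {x y : String} (h1 : ¬ pvBeats x y) (h2 : ¬ pvBeats y x) : x = y := by
  by_cases hl : x.toList.length = y.toList.length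
  · have hx : ¬ x < y := fun hc => h1 (Or.inr ⟨hl, hc⟩)
    have hy : ¬ y < x := fun hc => h2 (Or.inr ⟨hl.symm, hc⟩)
    exact le_antisymm (le_of_not_gt hy) (le_of_not_gt hx)
  · exfalso
    have hx : ¬ y.toList.length < x.toList.length := fun hc => h1 (Or.inl hc)
    have hy : ¬ x.toList.length < y.toList.length := fun hc => h2 (Or.inl hc)
    omega

-- B's step is left-commutative: folding a running maximum is order-independent.
theorem pvStepB_comm (s : String) (x y z : String) :
    pvStepB s (pvStepB s z x) y = pvStepB s (pvStepB s z y) x := by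
  by_cases px : pvSubB x.toList s.toList = true <;>
    by_cases py : pvSubB y.toList s.toList = true
  · rw [pvStepB_true s z x px, pvStepB_true s z y py]
    by_cases hxz : pvBeats x z <;> by_cases hyz : pvBeats y z
    · rw [if_pos hxz, if_pos hyz, pvStepB_true s x y py, pvStepB_true s y x px]
      by_cases hyx : pvBeats y x <;> by_cases hxy : pvBeats x y
      · exact (pvBeats_asymm hxy hyx).elim
      · rw [if_pos hyx, if_neg hxy]
      · rw [if_neg hyx, if_pos hxy]
      · rw [if_neg hyx, if_neg hxy]
        exact pvBeats_total_eq hxy hyx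
    · rw [if_pos hxz, if_neg hyz, pvStepB_true s x y py, pvStepB_true s z x px,
          if_neg (fun h => hyz (pvBeats_trans h hxz)), if_pos hxz]
    · rw [if_neg hxz, if_pos hyz, pvStepB_true s z y py, pvStepB_true s y x px,
          if_neg (fun h => hxz (pvBeats_trans h hyz)), if_pos hyz]
    · rw [if_neg hxz, if_neg hyz, pvStepB_true s z y py, pvStepB_true s z x px,
          if_neg hxz, if_neg hyz]
  · rw [pvStepB_neg s (pvStepB s z x) y (fun hc => py hc.1),
        pvStepB_neg s z y (fun hc => py hc.1)]
  · rw [pvStepB_neg s (pvStepB s z y) x (fun hc => px hc.1),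
        pvStepB_neg s z x (fun hc => px hc.1)]
  · rw [pvStepB_neg s z x (fun hc => px hc.1), pvStepB_neg s z y (fun hc => py hc.1),
        pvStepB_neg s z x (fun hc => px hc.1)]

-- If nothing in l beats res, the fold leaves res unchanged.
theorem pvFoldl_fixed (s res : String) (l : List String)
    (h : ∀ w ∈ l, ¬ pvBeats w res) : l.foldl (pvStepB s) res = res := by
  induction l with
  | nil => rfl
  | cons w ws ih =>
    rw [List.foldl_cons, pvStepB_neg s res w (fun hc => h w (by simp) hc.2)]
    exact ih (fun v hv => h v (by simp [hv]))

-- Unfolding equation for A's loop on a cons cell.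
theorem pvLoopA_cons (s res w : String) (ws : List String) :
    pvLoopA s res (w :: ws) =
      if w.toList.length < res.toList.length then res
      else if (res.toList.isEmpty || decide (w < res)) && pvSubA w.toList s.toList then
        pvLoopA s w ws
      else pvLoopA s res ws := rfl

-- Main loop invariant: on a length-non-increasing list, if every element is no longer
-- than res (or res is still ''), A's loop computes B's fold.
theorem pvLoopA_eq_foldl (s : String) (res : String) (l : List String)
    (hsorted : List.Pairwise (fun a b => b.toList.length ≤ a.toList.length) l)
    (hinv : res = "" ∨ ∀ w ∈ l, w.toList.length ≤ res.toList.length) :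
    pvLoopA s res l = l.foldl (pvStepB s) res := by
  induction l generalizing res with
  | nil => rfl
  | cons w ws ih =>
    have hpw : ∀ v ∈ ws, v.toList.length ≤ w.toList.length := by
      intro v hv; exact List.rel_of_pairwise_cons hsorted hv
    have htail := hsorted.of_cons
    rw [pvLoopA_cons]
    by_cases hshort : w.toList.length < res.toList.length
    · -- early return: everything remaining is too short to beat res
      rw [if_pos hshort]
      symm
      apply pvFoldl_fixed
      intro v hv hb
      have hvlen : v.toList.length ≤ w.toList.length := by
        rcases List.mem_cons.mp hv with rfl | hv'
        · exact le_refl _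
        · exact hpw v hv'
      rcases hb with hb | ⟨hb, _⟩ <;> omega
    · rw [if_neg hshort]
      by_cases hcond : ((res.toList.isEmpty || decide (w < res)) && pvSubA w.toList s.toList) = true
      · rw [if_pos hcond]
        have hsub : pvSubB w.toList s.toList = true := by
          have := ((Bool.and_eq_true _ _).mp hcond).2
          rwa [pvSub_eq] at this
        have hor := ((Bool.and_eq_true _ _).mp hcond).1
        have hstep : pvStepB s res w = w := by
          by_cases hres : res = ""
          · subst hres
            by_cases hw0 : w.toList.length = 0
            · have hw : w = "" := String.toList_eq_nil_iff.mp (List.length_eq_zero_iff.mp hw0)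
              subst hw
              apply pvStepB_neg
              rintro ⟨-, hb | ⟨-, hb⟩⟩
              · omega
              · exact lt_irrefl _ hb
            · have h0 : ("" : String).toList.length = 0 := rfl
              exact pvStepB_pos s "" w hsub (Or.inl (by omega))
          · have hle : w.toList.length ≤ res.toList.length := by
              rcases hinv with h | h
              · exact absurd h hres
              · exact h w (by simp)
            have hlen : w.toList.length = res.toList.length := by omega
            have hlt : w < res := by
              rcases (Bool.or_eq_true _ _).mp hor with h | h
              · exact absurd (String.toList_eq_nil_iff.mp (List.isEmpty_iff.mp h)) hres
              · exact of_decide_eq_true h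
            exact pvStepB_pos s res w hsub (Or.inr ⟨hlen, hlt⟩)
        rw [List.foldl_cons, hstep]
        exact ih w htail (Or.inr hpw)
      · rw [if_neg hcond]
        have hstep : pvStepB s res w = res := by
          apply pvStepB_neg
          rintro ⟨hsub, hb⟩
          rw [pvSub_eq] at hcond
          by_cases hres : res = ""
          · subst hres
            have he : ("" : String).toList.isEmpty = true := rfl
            rw [he, Bool.true_or, Bool.true_and] at hcond
            exact hcond hsub
          · have hle : w.toList.length ≤ res.toList.length := by
              rcases hinv with h | h
              · exact absurd h hres
              · exact h w (by simp)
            rcases hb with hb | ⟨hblen, hblt⟩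
            · omega
            · have hd : decide (w < res) = true := decide_eq_true hblt
              rw [hd, Bool.or_true, Bool.true_and] at hcond
              exact hcond hsub
        rw [List.foldl_cons, hstep]
        apply ih res htail
        rcases hinv with h | h
        · exact Or.inl h
        · exact Or.inr (fun v hv => h v (by simp [hv]))

-- ===== VERDICT (by name: the statement is the Claim_ definition above) =====
theorem solution_309_1_1_spec : Claim_equal_solution_309_1_1 := by
  intro s d _
  unfold Spec_solution_309_1_1 solution_309_1_1 solution_309_1_1_alt
  rw [pvLoopA_eq_foldl s "" _ (PySem.List.sorted_pairwise_rev d _) (Or.inl rfl)]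
  exact List.Perm.foldl_eq' (PySem.List.sorted_perm d _ true)
    (fun x _ y _ z => pvStepB_comm s x y z) ""
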